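-- pv_equiv track=rewrite | github.com/miliar/Code_Jam_Webscraper | solutions_python/solutions_year15_round0_nr3/626.py | get_ijk
-- ===== SOURCE A (Python) =====
-- ijk_dic=["i","j","k"]
--
-- def get_ijk(string,digits):
--     fail=0
--     i=0
--     j=0
--     str_list=[""]
--     while j<digits:
--         if str_list[i]!=ijk_dic[i] or i==2:
--             if len(str_list[i])>0 and str_list[i][0]=="-":
--                 op="-"
--                 str_list[i]=str_list[i].replace("-","")
--             else:
--                 op=""
--             mul=mul_dic[str_list[i],string[j]]
--             if mul[0]=="-":
--                 op2="-"
--                 mul=mul.replace("-","")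
--             else:
--                 op2=""
--             str_list[i]=get_op(op,op2)+mul
--             j+=1
--         elif str_list[i]==ijk_dic[i] and i<2:
--             i+=1
--             str_list.append("")
--     if i==2 and str_list[i]==ijk_dic[i]:
--         return True
--     return False
--
-- def get_op(str1,str2):
--     if len(str1)==0:
--         return len(str2)!=0 and "-" or ""
--     elif len(str2)==0:
--         return len(str1)!=0 and "-" or ""
--     elif (str1[0]=="-" and str2[0]!="-") or (str1[0]!="-" and str2[0]=="-"):
--         return "-"
--     else:
--         return ""
--
-- mul_dic={
--     ("","1"):"1",("","i"):"i",
--     ("","j"):"j",("","k"):"k",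
--     ("1","1"):"1",("1","i"):"i",
--     ("1","j"):"j",("1","k"):"k",
--     ("i","1"):"i",("i","i"):"-1",
--     ("i","j"):"k",("i","k"):"-j",
--     ("j","1"):"j",("j","i"):"-k",
--     ("j","j"):"-1",("j","k"):"i",
--     ("k","1"):"k",("k","i"):"j",
--     ("k","j"):"-i",("k","k"):"-1",
-- }
-- ===== SOURCE B (Python) =====
-- _UNIT = {"1": 0, "i": 1, "j": 2, "k": 3}
--
-- _TAB = [
--     [(1, 0), (1, 1), (1, 2), (1, 3)],
--     [(1, 1), (-1, 0), (1, 3), (-1, 2)],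
--     [(1, 2), (-1, 3), (-1, 0), (1, 1)],
--     [(1, 3), (1, 2), (-1, 1), (-1, 0)],
-- ]
--
-- def get_ijk(string, digits):
--     prefix = []
--     sign, axis = 1, 0
--     for j in range(digits):
--         ds, dx = _TAB[axis][_UNIT[string[j]]]
--         sign, axis = sign * ds, dx
--         prefix.append((sign, axis))
--     if not prefix or prefix[-1] != (-1, 0):
--         return False
--     if (1, 1) not in prefix:
--         return False
--     p = prefix.index((1, 1))
--     return (1, 3) in prefix[p + 1:]
-- ===== Notes on version B (the rewrite author's own statement) =====
-- stated objective: alternative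
-- what changed: A's block-pointer state machine that multiplies sign-carrying unit strings via a 20-entry string dict and resets an accumulator per block is replaced by one cumulative-product scan over (sign, axis) integer pairs followed by searches for the first prefix equal to i, a later prefix equal to k, and a total product of -1.
import Mathlib
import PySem

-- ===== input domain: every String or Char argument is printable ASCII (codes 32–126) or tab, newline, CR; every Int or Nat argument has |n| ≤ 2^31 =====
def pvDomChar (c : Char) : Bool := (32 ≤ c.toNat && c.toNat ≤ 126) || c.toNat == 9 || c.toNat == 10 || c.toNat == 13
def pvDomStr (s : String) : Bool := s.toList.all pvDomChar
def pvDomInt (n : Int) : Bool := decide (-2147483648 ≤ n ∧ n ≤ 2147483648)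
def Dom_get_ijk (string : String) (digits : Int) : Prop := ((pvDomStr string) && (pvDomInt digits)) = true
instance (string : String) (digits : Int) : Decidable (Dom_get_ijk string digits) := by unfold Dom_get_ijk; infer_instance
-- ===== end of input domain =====

-- B rewrites A's block-pointer machine over sign-carrying strings as one cumulative-product
-- scan over (sign, axis) integer pairs followed by index searches; same return value on Pre_.

-- ===== PORT A =====
-- Python strings are represented as List Char (PySem.Chars level); Python's 1-char string
-- string[j] is represented by the Char PySem.Str.pyGet? yields, so mul_dic is keyed by
-- (List Char × Char) — the same 20 entries in the same order.
def ijk_dic : List (List Char) := [['i'], ['j'], ['k']]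

def get_op (str1 str2 : List Char) : List Char :=
  if str1.length = 0 then (if str2.length ≠ 0 then ['-'] else [])
  else if str2.length = 0 then (if str1.length ≠ 0 then ['-'] else [])
  else if (PySem.List.pyGet? str1 0 = some '-' ∧ ¬ PySem.List.pyGet? str2 0 = some '-')
        ∨ (¬ PySem.List.pyGet? str1 0 = some '-' ∧ PySem.List.pyGet? str2 0 = some '-') then ['-']
  else []

def mul_dic : PySem.Dict (List Char × Char) (List Char) := PySem.Dict.ofList
  [ (([], '1'), ['1']), (([], 'i'), ['i']),
    (([], 'j'), ['j']), (([], 'k'), ['k']),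
    ((['1'], '1'), ['1']), ((['1'], 'i'), ['i']),
    ((['1'], 'j'), ['j']), ((['1'], 'k'), ['k']),
    ((['i'], '1'), ['i']), ((['i'], 'i'), ['-', '1']),
    ((['i'], 'j'), ['k']), ((['i'], 'k'), ['-', 'j']),
    ((['j'], '1'), ['j']), ((['j'], 'i'), ['-', 'k']),
    ((['j'], 'j'), ['-', '1']), ((['j'], 'k'), ['i']),
    ((['k'], '1'), ['k']), ((['k'], 'i'), ['j']),
    ((['k'], 'j'), ['-', 'i']), ((['k'], 'k'), ['-', '1']) ]

-- the body of A's consuming branch, acting on str_list[i] and the character string[j];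
-- none = the KeyError of mul_dic[...] (excluded by Pre_)
def consumeAcc (cur : List Char) (c : Char) : Option (List Char) :=
  let p := if cur.length > 0 ∧ PySem.List.pyGet? cur 0 = some '-'
           then (['-'], PySem.Chars.replace cur ['-'] []) else (([] : List Char), cur)
  match mul_dic.get? (p.2, c) with
  | none => none
  | some mul0 =>
    let q := if PySem.List.pyGet? mul0 0 = some '-'
             then (['-'], PySem.Chars.replace mul0 ['-'] []) else (([] : List Char), mul0)
    some (get_op p.1 q.1 ++ q.2)

-- A's while-loop; the final `if i==2 and …` check is the base case.
def loopA (cs : List Char) (digits : Int) (str_list : List (List Char)) (i : Nat) (j : Int) : Bool :=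
  if hj : j < digits then
    let cur := str_list.getD i []
    if cur ≠ ijk_dic.getD i [] ∨ i = 2 then
      match PySem.List.pyGet? cs j with
      | none => false            -- IndexError: string[j] (excluded by Pre_)
      | some c =>
        match consumeAcc cur c with
        | none => false          -- KeyError: mul_dic[...] (excluded by Pre_)
        | some s2 => loopA cs digits (str_list.set i s2) i (j + 1)
    else if hi : i < 2 then
      loopA cs digits (str_list ++ [[]]) (i + 1) j
    else false                  -- unreachable: Python's elif covers exactly this complement for i ≤ 2
  else
    decide (i = 2) && decide (str_list.getD i [] = ['k'])
termination_by ((digits - j).toNat) * 3 + (2 - i)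
decreasing_by
  · omega
  · omega

def get_ijk (string : String) (digits : Int) : Bool :=
  -- fail=0 in the Python is never used
  loopA string.toList digits [[]] 0 0

-- ===== PORT B =====
def pyUNIT : PySem.Dict Char Nat := PySem.Dict.ofList [('1', 0), ('i', 1), ('j', 2), ('k', 3)]

def pyTAB : List (List (Int × Nat)) :=
  [ [(1, 0), (1, 1), (1, 2), (1, 3)],
    [(1, 1), (-1, 0), (1, 3), (-1, 2)],
    [(1, 2), (-1, 3), (-1, 0), (1, 1)],
    [(1, 3), (1, 2), (-1, 1), (-1, 0)] ]

-- Source B's for-loop over range(digits), building the list `prefix` of cumulative products;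
-- none = the IndexError of string[j] / KeyError of _UNIT[...] (excluded by Pre_)
def buildPrefix (cs : List Char) (js : List Int) (sign : Int) (axis : Nat) :
    Option (List (Int × Nat)) :=
  match js with
  | [] => some []
  | j :: rest =>
    match PySem.List.pyGet? cs j with
    | none => none
    | some c =>
      match pyUNIT.get? c with
      | none => none
      | some u =>
        let t := (pyTAB.getD axis []).getD u (1, 0)
        match buildPrefix cs rest (sign * t.1) t.2 with
        | none => none
        | some tl => some ((sign * t.1, t.2) :: tl)

def get_ijk_alt (string : String) (digits : Int) : Bool :=
  match buildPrefix string.toList (PySem.List.pyRange 0 digits 1) 1 0 with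
  | none => false
  | some pre =>
    if pre = [] ∨ ¬ (PySem.List.pyGet? pre (-1) = some ((-1 : Int), (0 : Nat))) then false
    else if ¬ (((1 : Int), (1 : Nat)) ∈ pre) then false
    else
      match PySem.List.index? pre ((1 : Int), (1 : Nat)) with
      | none => false            -- unreachable: membership was just checked
      | some p => decide (((1 : Int), (3 : Nat)) ∈ PySem.List.slice pre (some ((p : Int) + 1)) none)

-- ===== PRECONDITION & SPEC =====
-- Pre_ excludes exactly the inputs where A raises: digits beyond the string's length
-- (IndexError at string[j]) and consumed characters outside "1ijk" (KeyError in mul_dic).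
def Pre_get_ijk (string : String) (digits : Int) : Prop :=
  digits ≤ (PySem.Str.len string : Int) ∧
    ((string.toList.take digits.toNat).all
      (fun c => decide (c ∈ (['1', 'i', 'j', 'k'] : List Char)))) = true
instance (string : String) (digits : Int) : Decidable (Pre_get_ijk string digits) := by
  unfold Pre_get_ijk; infer_instance

def pvWitness_get_ijk : String × Int := ("ijk", 3)

def Spec_get_ijk (string : String) (digits : Int) (out : Bool) : Prop := out = get_ijk_alt string digits
instance (string : String) (digits : Int) (out : Bool) : Decidable (Spec_get_ijk string digits out) := by unfold Spec_get_ijk; infer_instance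

-- ===== CLAIM (what is proved, stated in full; the proofs are below) =====
def Claim_equal_get_ijk : Prop := ∀ (string : String) (digits : Int), Dom_get_ijk string digits → Pre_get_ijk string digits → Spec_get_ijk string digits (get_ijk string digits)

-- ===== LEMMAS AND PROOFS =====

-- Abstract model: quaternion units as (sign, axis) pairs, multiplied through pyTAB.
def sgT (x y : Nat) : Int := ((pyTAB.getD x []).getD y ((1 : Int), (0 : Nat))).1
def axT (x y : Nat) : Nat := ((pyTAB.getD x []).getD y ((1 : Int), (0 : Nat))).2
def mulQ (a b : Int × Nat) : Int × Nat := (a.1 * b.1 * sgT a.2 b.2, axT a.2 b.2)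
def targetQ (i : Nat) : Int × Nat := (1, i + 1)
def invQ (v : Int × Nat) : Int × Nat := (if v.2 = 0 then v.1 else -v.1, v.2)
def validQ (v : Int × Nat) : Prop := (v.1 = 1 ∨ v.1 = -1) ∧ v.2 < 4

def VL : List (Int × Nat) := [(1,0),(1,1),(1,2),(1,3),(-1,0),(-1,1),(-1,2),(-1,3)]
def SL : List (List Char) := [[], ['1'], ['i'], ['j'], ['k'], ['-','1'], ['-','i'], ['-','j'], ['-','k']]
def alphaL : List Char := ['1', 'i', 'j', 'k']
def charU (c : Char) : Nat := if c = '1' then 0 else if c = 'i' then 1 else if c = 'j' then 2 else 3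

def decodeQ (s : List Char) : Int × Nat :=
  if s = ['i'] then (1,1) else if s = ['j'] then (1,2) else if s = ['k'] then (1,3)
  else if s = ['-','1'] then (-1,0) else if s = ['-','i'] then (-1,1)
  else if s = ['-','j'] then (-1,2) else if s = ['-','k'] then (-1,3) else (1,0)
def encodeQ (v : Int × Nat) : List Char :=
  (if v.1 < 0 then ['-'] else []) ++ [alphaL.getD v.2 '1']

-- A's loop abstracted to unit indices: i = current block, v = current block value.
def amodel (i : Nat) (v : Int × Nat) (us : List Nat) : Bool :=
  if i < 2 ∧ v = targetQ i then amodel (i + 1) (1, 0) us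
  else
    match us with
    | [] => decide (i = 2 ∧ v = targetQ 2)
    | u :: rest => amodel i (mulQ v (1, u)) rest
termination_by (us.length, 2 - i)
decreasing_by
  all_goals first
    | exact Prod.Lex.right _ (by omega)
    | exact Prod.Lex.left _ _ (by simp)

def foldQ (v : Int × Nat) (us : List Nat) : Int × Nat := us.foldl (fun a u => mulQ a (1, u)) v
def prodQ (us : List Nat) : Int × Nat := foldQ (1, 0) us
def scanQ (v : Int × Nat) (us : List Nat) : List (Int × Nat) :=
  match us with
  | [] => []
  | u :: rest => mulQ v (1, u) :: scanQ (mulQ v (1, u)) rest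

-- finite table facts
lemma axT_lt (x y : Nat) (hx : x < 4) (hy : y < 4) : axT x y < 4 := by
  interval_cases x <;> interval_cases y <;> decide
lemma sgT_pm (x y : Nat) (hx : x < 4) (hy : y < 4) : sgT x y = 1 ∨ sgT x y = -1 := by
  interval_cases x <;> interval_cases y <;> decide
lemma tbl_assoc (x y z : Nat) (hx : x < 4) (hy : y < 4) (hz : z < 4) :
    axT (axT x y) z = axT x (axT y z) ∧ sgT x y * sgT (axT x y) z = sgT y z * sgT x (axT y z) := by
  interval_cases x <;> interval_cases y <;> interval_cases z <;> decide
lemma row0 (y : Nat) (hy : y < 4) : sgT 0 y = 1 ∧ axT 0 y = y := by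
  interval_cases y <;> decide
lemma col0 (x : Nat) (hx : x < 4) : sgT x 0 = 1 ∧ axT x 0 = x := by
  interval_cases x <;> decide

lemma mulQ_assoc (a b c : Int × Nat) (ha : a.2 < 4) (hb : b.2 < 4) (hc : c.2 < 4) :
    mulQ (mulQ a b) c = mulQ a (mulQ b c) := by
  obtain ⟨h1, h2⟩ := tbl_assoc a.2 b.2 c.2 ha hb hc
  simp only [mulQ, Prod.mk.injEq]
  constructor
  · calc a.1 * b.1 * sgT a.2 b.2 * c.1 * sgT (axT a.2 b.2) c.2
        = a.1 * b.1 * c.1 * (sgT a.2 b.2 * sgT (axT a.2 b.2) c.2) := by ring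
      _ = a.1 * b.1 * c.1 * (sgT b.2 c.2 * sgT a.2 (axT b.2 c.2)) := by rw [h2]
      _ = a.1 * (b.1 * c.1 * sgT b.2 c.2) * sgT a.2 (axT b.2 c.2) := by ring
  · exact h1

lemma mulQ_one_right (v : Int × Nat) (hv : v.2 < 4) : mulQ v (1, 0) = v := by
  obtain ⟨h1, h2⟩ := col0 v.2 hv
  simp [mulQ, h1, h2]
lemma mulQ_one_left (w : Int × Nat) (hw : w.2 < 4) : mulQ (1, 0) w = w := by
  obtain ⟨h1, h2⟩ := row0 w.2 hw
  simp [mulQ, h1, h2]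
lemma mulQ_ax_lt (a b : Int × Nat) (ha : a.2 < 4) (hb : b.2 < 4) : (mulQ a b).2 < 4 :=
  axT_lt a.2 b.2 ha hb
lemma validQ_mulQ (a b : Int × Nat) (ha : validQ a) (hb : validQ b) : validQ (mulQ a b) := by
  obtain ⟨ha1, ha2⟩ := ha; obtain ⟨hb1, hb2⟩ := hb
  refine ⟨?_, axT_lt _ _ ha2 hb2⟩
  rcases sgT_pm a.2 b.2 ha2 hb2 with h | h <;> rcases ha1 with h1 | h1 <;> rcases hb1 with h2 | h2 <;>
    simp [mulQ, h, h1, h2]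
lemma invQ_cancel (v : Int × Nat) (hv : validQ v) : mulQ (invQ v) v = (1, 0) := by
  have h4 := hv.2
  rcases hv.1 with h1 | h1 <;>
    (obtain ⟨v1, v2⟩ := v; simp only at h1 h4; subst h1; interval_cases v2 <;> decide)
lemma mulQ_cancel_left (v w : Int × Nat) (hv : validQ v) (hw : w.2 < 4) :
    mulQ (invQ v) (mulQ v w) = w := by
  rw [← mulQ_assoc _ _ _ (by exact hv.2) hv.2 hw, invQ_cancel v hv, mulQ_one_left w hw]

lemma validQ_unit (u : Nat) (hu : u < 4) : validQ (1, u) := ⟨Or.inl rfl, hu⟩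
lemma charU_lt (c : Char) : charU c < 4 := by
  unfold charU; split_ifs <;> omega

lemma validQ_foldQ (v : Int × Nat) (us : List Nat) (hv : validQ v) (hus : ∀ u ∈ us, u < 4) :
    validQ (foldQ v us) := by
  induction us generalizing v with
  | nil => exact hv
  | cons u rest ih =>
    exact ih (mulQ v (1, u)) (validQ_mulQ _ _ hv (validQ_unit u (hus u (by simp))))
      (fun x hx => hus x (by simp [hx]))

lemma foldQ_cons (v : Int × Nat) (u : Nat) (rest : List Nat) :
    foldQ v (u :: rest) = foldQ (mulQ v (1, u)) rest := rfl

lemma foldQ_append (v : Int × Nat) (xs ys : List Nat) :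
    foldQ v (xs ++ ys) = foldQ (foldQ v xs) ys := by
  simp [foldQ, List.foldl_append]

lemma foldQ_hom (v : Int × Nat) (us : List Nat) (hv : v.2 < 4) (hus : ∀ u ∈ us, u < 4) :
    foldQ v us = mulQ v (prodQ us) := by
  induction us generalizing v with
  | nil => exact (mulQ_one_right v hv).symm
  | cons u rest ih =>
    have hu : u < 4 := hus u (by simp)
    have hrest : ∀ x ∈ rest, x < 4 := fun x hx => hus x (by simp [hx])
    have hvp : validQ (prodQ rest) := validQ_foldQ _ _ ⟨Or.inl rfl, by norm_num⟩ hrest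
    have h2 : prodQ (u :: rest) = mulQ (1, u) (prodQ rest) := by
      rw [prodQ, foldQ_cons, mulQ_one_left (1, u) hu]; exact ih _ hu hrest
    rw [foldQ_cons, ih _ (mulQ_ax_lt _ _ hv hu) hrest, h2,
      mulQ_assoc v (1, u) (prodQ rest) hv hu hvp.2]

-- finite checks relating A's sign-carrying strings to the (sign, axis) model
lemma K1 : ∀ acc ∈ SL, ∀ c ∈ alphaL,
    consumeAcc acc c = some (encodeQ (mulQ (decodeQ acc) (1, charU c))) ∧
    encodeQ (mulQ (decodeQ acc) (1, charU c)) ∈ SL ∧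
    decodeQ (encodeQ (mulQ (decodeQ acc) (1, charU c))) = mulQ (decodeQ acc) (1, charU c) := by
  intro acc hacc c hc
  fin_cases hacc <;> fin_cases hc <;> decide

lemma condEq : ∀ acc ∈ SL, ∀ i : Nat, i < 2 →
    ((acc = ijk_dic.getD i []) ↔ decodeQ acc = targetQ i) := by
  intro acc hacc i hi
  interval_cases i <;> fin_cases hacc <;> decide

lemma kEq : ∀ acc ∈ SL, ((acc = ['k']) ↔ decodeQ acc = targetQ 2) := by
  intro acc hacc; fin_cases hacc <;> decide

-- amodel branch equations
lemma amodel_advance (i : Nat) (v : Int × Nat) (us : List Nat) (h : i < 2 ∧ v = targetQ i) :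
    amodel i v us = amodel (i + 1) (1, 0) us := by
  conv_lhs => rw [amodel.eq_def]
  rw [if_pos h]

lemma amodel_cons (i : Nat) (v : Int × Nat) (u : Nat) (rest : List Nat)
    (h : ¬ (i < 2 ∧ v = targetQ i)) :
    amodel i v (u :: rest) = amodel i (mulQ v (1, u)) rest := by
  conv_lhs => rw [amodel.eq_def]
  rw [if_neg h]

lemma amodel_nil (i : Nat) (v : Int × Nat) : amodel i v [] = decide (i = 2 ∧ v = targetQ 2) := by
  rw [amodel.eq_def]
  split_ifs with h
  · obtain ⟨hi, rfl⟩ := h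
    rw [amodel.eq_def]
    have h1 : ¬ (i + 1 < 2 ∧ ((1, 0) : Int × Nat) = targetQ (i + 1)) := by
      rintro ⟨_, hh⟩; simp [targetQ] at hh
    rw [if_neg h1, decide_eq_decide]
    constructor
    · rintro ⟨_, hh⟩; simp [targetQ] at hh
    · rintro ⟨hh, _⟩; omega
  · rfl

-- loopA branch equations
lemma loopA_base (cs : List Char) (digits : Int) (strs : List (List Char)) (i : Nat) (j : Int)
    (h : ¬ j < digits) :
    loopA cs digits strs i j = (decide (i = 2) && decide (strs.getD i [] = ['k'])) := by
  rw [loopA, dif_neg h]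

lemma loopA_consume (cs : List Char) (digits : Int) (strs : List (List Char)) (i : Nat) (j : Int)
    (c : Char) (s2 : List Char) (hj : j < digits)
    (hX : strs.getD i [] ≠ ijk_dic.getD i [] ∨ i = 2)
    (hc : PySem.List.pyGet? cs j = some c)
    (hs : consumeAcc (strs.getD i []) c = some s2) :
    loopA cs digits strs i j = loopA cs digits (strs.set i s2) i (j + 1) := by
  conv_lhs => rw [loopA]
  rw [dif_pos hj]
  simp only [if_pos hX, hc, hs]

lemma loopA_advance (cs : List Char) (digits : Int) (strs : List (List Char)) (i : Nat) (j : Int)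
    (hj : j < digits)
    (hX : ¬ (strs.getD i [] ≠ ijk_dic.getD i [] ∨ i = 2)) (hi : i < 2) :
    loopA cs digits strs i j = loopA cs digits (strs ++ [[]]) (i + 1) j := by
  conv_lhs => rw [loopA]
  rw [dif_pos hj]
  simp only [if_neg hX, dif_pos hi]

lemma getD_snoc {α : Type} (xs : List α) (a b : α) : (xs ++ [a]).getD xs.length b = a := by
  simp [List.getD]

-- The main A-side lemma: A's loop equals the abstract block machine.
theorem loopA_eq (cs : List Char) (digits : Int) (hd : digits ≤ (cs.length : Int))
    (hall : ∀ c ∈ cs.take digits.toNat, c ∈ alphaL) :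
    ∀ (n : Nat) (jn i : Nat) (acc : List Char),
      (digits - jn).toNat * 3 + (2 - i) = n → i ≤ 2 → acc ∈ SL →
      loopA cs digits (ijk_dic.take i ++ [acc]) i jn
        = amodel i (decodeQ acc) (((cs.take digits.toNat).drop jn).map charU) := by
  intro n
  induction n using Nat.strong_induction_on with
  | _ n ih =>
    intro jn i acc hn hi hacc
    have htakei : (ijk_dic.take i).length = i := by
      rw [List.length_take]
      have : ijk_dic.length = 3 := rfl
      omega
    have hcur : (ijk_dic.take i ++ [acc]).getD i [] = acc := by
      have := getD_snoc (ijk_dic.take i) acc ([] : List Char)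
      rwa [htakei] at this
    by_cases hj : (jn : Int) < digits
    · have hjd : jn < digits.toNat := by omega
      have hlen2 : digits.toNat ≤ cs.length := by omega
      have htlen : (cs.take digits.toNat).length = digits.toNat := by
        rw [List.length_take]; omega
      by_cases hY : i < 2 ∧ decodeQ acc = targetQ i
      · -- advance
        have haeq : acc = ijk_dic.getD i [] := (condEq acc hacc i hY.1).mpr hY.2
        have hX : ¬ ((ijk_dic.take i ++ [acc]).getD i [] ≠ ijk_dic.getD i [] ∨ i = 2) := by
          rw [hcur]; push Not; exact ⟨haeq, by omega⟩
        rw [loopA_advance cs digits _ i jn hj hX hY.1]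
        have hstr : (ijk_dic.take i ++ [acc]) ++ [[]] = ijk_dic.take (i + 1) ++ [([] : List Char)] := by
          subst haeq
          obtain ⟨hilt, -⟩ := hY
          interval_cases i <;> rfl
        rw [hstr, amodel_advance i (decodeQ acc) _ hY]
        have := ih ((digits - jn).toNat * 3 + (2 - (i + 1))) (by omega) jn (i + 1) []
          rfl (by omega) (by simp [SL])
        simpa [decodeQ] using this
      · -- consume
        have hX : (ijk_dic.take i ++ [acc]).getD i [] ≠ ijk_dic.getD i [] ∨ i = 2 := by
          rw [hcur]
          by_cases h2 : i = 2
          · right; exact h2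
          · left; intro he; exact hY ⟨by omega, (condEq acc hacc i (by omega)).mp he⟩
        have hjlt : jn < cs.length := by omega
        have hget : PySem.List.pyGet? cs (jn : Int) = some cs[jn] := by
          simp [List.getElem?_eq_getElem hjlt]
        have hcmem : cs[jn] ∈ alphaL := by
          apply hall
          have hjt : jn < (cs.take digits.toNat).length := by omega
          have hg : (cs.take digits.toNat)[jn] = cs[jn] := List.getElem_take
          rw [← hg]
          exact List.getElem_mem hjt
        obtain ⟨hK1a, hK1b, hK1c⟩ := K1 acc hacc cs[jn] hcmem
        rw [loopA_consume cs digits _ i jn cs[jn] _ hj hX hget (by rw [hcur]; exact hK1a)]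
        have hset : (ijk_dic.take i ++ [acc]).set i (encodeQ (mulQ (decodeQ acc) (1, charU cs[jn])))
            = ijk_dic.take i ++ [encodeQ (mulQ (decodeQ acc) (1, charU cs[jn]))] := by
          conv_lhs => rw [← htakei]
          simp
        rw [hset]
        have hus : (cs.take digits.toNat).drop jn
            = cs[jn] :: (cs.take digits.toNat).drop (jn + 1) := by
          have hjt : jn < (cs.take digits.toNat).length := by omega
          rw [List.drop_eq_getElem_cons hjt]
          congr 1
          exact List.getElem_take
        rw [hus, List.map_cons, amodel_cons i (decodeQ acc) _ _ hY]
        have hrec := ih ((digits - (jn + 1 : Nat)).toNat * 3 + (2 - i)) (by omega) (jn + 1) i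
          (encodeQ (mulQ (decodeQ acc) (1, charU cs[jn]))) rfl hi hK1b
        rw [hK1c] at hrec
        have hcast : ((jn : Int) + 1) = ((jn + 1 : Nat) : Int) := by push_cast; ring
        rw [hcast]
        exact hrec
    · -- base
      rw [loopA_base cs digits _ i jn hj]
      have hdrop : (cs.take digits.toNat).drop jn = [] := by
        apply List.drop_eq_nil_of_le
        have h1 : (cs.take digits.toNat).length ≤ digits.toNat := by
          rw [List.length_take]; omega
        omega
      rw [hdrop, List.map_nil, amodel_nil]
      by_cases h2 : i = 2
      · subst h2
        rw [hcur]
        by_cases hk : decodeQ acc = targetQ 2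
        · have hke : acc = ['k'] := (kEq acc hacc).mpr hk
          subst hke
          simp [hk]
        · have hke : acc ≠ ['k'] := fun h => hk ((kEq acc hacc).mp h)
          simp [hke, hk]
      · simp [h2]

-- closed-form characterisations of the three phases of the block machine
lemma phase2_eq (us : List Nat) : ∀ v, amodel 2 v us = decide (foldQ v us = targetQ 2) := by
  induction us with
  | nil => intro v; rw [amodel_nil]; simp [foldQ]
  | cons u r ihr =>
    intro v
    rw [amodel_cons 2 v u r (by simp), ihr, foldQ_cons]

def P1cond (ys : List Nat) : Prop :=
  ∃ t ≤ ys.length, foldQ (1, 0) (ys.take t) = targetQ 1 ∧ foldQ (1, 0) (ys.drop t) = targetQ 2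

lemma phase1_eq (us : List Nat) (hus : ∀ u ∈ us, u < 4) : ∀ v, validQ v →
    (amodel 1 v us = true ↔
      ∃ t ≤ us.length, foldQ v (us.take t) = targetQ 1 ∧ foldQ (1, 0) (us.drop t) = targetQ 2) := by
  induction us with
  | nil =>
    intro v hv
    rw [amodel_nil]
    constructor
    · intro h; simp at h
    · rintro ⟨t, ht, h1, h2⟩
      rw [List.drop_nil] at h2
      exact absurd h2 (by decide)
  | cons u r ihr =>
    intro v hv
    have hu : u < 4 := hus u (by simp)
    have hr : ∀ x ∈ r, x < 4 := fun x hx => hus x (by simp [hx])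
    by_cases hveq : v = targetQ 1
    · rw [amodel_advance 1 v _ ⟨by omega, hveq⟩, phase2_eq]
      constructor
      · intro h
        exact ⟨0, by omega, by simpa [foldQ] using hveq, by simpa using of_decide_eq_true h⟩
      · rintro ⟨t, ht, h1, h2⟩
        have htv : ∀ x ∈ (u :: r).take t, x < 4 := fun x hx => hus x (List.mem_of_mem_take hx)
        have hprod : prodQ ((u :: r).take t) = (1, 0) := by
          have hvald : validQ (prodQ ((u :: r).take t)) :=
            validQ_foldQ _ _ ⟨Or.inl rfl, by norm_num⟩ htv
          have h1' : mulQ v (prodQ ((u :: r).take t)) = targetQ 1 := by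
            rw [← foldQ_hom v _ hv.2 htv]; exact h1
          have := congrArg (mulQ (invQ v)) h1'
          rw [mulQ_cancel_left v _ hv hvald.2] at this
          rw [this, hveq]
          decide
        have : foldQ (1, 0) (u :: r) = targetQ 2 := by
          conv_lhs => rw [← List.take_append_drop t (u :: r)]
          rw [foldQ_append, ← prodQ, hprod]
          exact h2
        simp [this]
    · have hcond : ¬ (1 < 2 ∧ v = targetQ 1) := by rintro ⟨_, h⟩; exact hveq h
      rw [amodel_cons 1 v u r hcond]
      rw [ihr hr _ (validQ_mulQ _ _ hv (validQ_unit u hu))]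
      constructor
      · rintro ⟨t, ht, h1, h2⟩
        exact ⟨t + 1, by simpa using ht, by simpa [foldQ_cons] using h1, by simpa using h2⟩
      · rintro ⟨t, ht, h1, h2⟩
        cases t with
        | zero =>
          exfalso
          exact hveq (by simpa [foldQ] using h1)
        | succ t' =>
          exact ⟨t', by simp at ht; omega, by simpa [foldQ_cons] using h1, by simpa using h2⟩

lemma phase0_eq (us : List Nat) (hus : ∀ u ∈ us, u < 4) : ∀ v, validQ v →
    (amodel 0 v us = true ↔
      ∃ t ≤ us.length, foldQ v (us.take t) = targetQ 0 ∧ P1cond (us.drop t)) := by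
  induction us with
  | nil =>
    intro v hv
    rw [amodel_nil]
    constructor
    · intro h; simp at h
    · rintro ⟨t, ht, h1, t', ht', h2, h3⟩
      rw [List.drop_nil, List.take_nil] at h2
      exact absurd h2 (by decide)
  | cons u r ihr =>
    intro v hv
    have hu : u < 4 := hus u (by simp)
    have hr : ∀ x ∈ r, x < 4 := fun x hx => hus x (by simp [hx])
    by_cases hveq : v = targetQ 0
    · rw [amodel_advance 0 v _ ⟨by omega, hveq⟩]
      rw [phase1_eq (u :: r) hus (1, 0) ⟨Or.inl rfl, by norm_num⟩]
      constructor
      · intro h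
        exact ⟨0, by omega, by simpa [foldQ] using hveq, h⟩
      · rintro ⟨t, ht, h1, t', ht', h2, h3⟩
        have htv : ∀ x ∈ (u :: r).take t, x < 4 := fun x hx => hus x (List.mem_of_mem_take hx)
        have hdv : ∀ x ∈ (u :: r).drop t, x < 4 := fun x hx => hus x (List.mem_of_mem_drop hx)
        have hprod : prodQ ((u :: r).take t) = (1, 0) := by
          have hvald : validQ (prodQ ((u :: r).take t)) :=
            validQ_foldQ _ _ ⟨Or.inl rfl, by norm_num⟩ htv
          have h1' : mulQ v (prodQ ((u :: r).take t)) = targetQ 0 := by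
            rw [← foldQ_hom v _ hv.2 htv]; exact h1
          have := congrArg (mulQ (invQ v)) h1'
          rw [mulQ_cancel_left v _ hv hvald.2] at this
          rw [this, hveq]
          decide
        refine ⟨t + t', ?_, ?_, ?_⟩
        · have := List.length_drop (l := u :: r) (i := t)
          omega
        · rw [List.take_add, foldQ_append, ← prodQ, hprod]
          exact h2
        · rw [← List.drop_drop]
          exact h3
    · have hcond : ¬ (0 < 2 ∧ v = targetQ 0) := by rintro ⟨_, h⟩; exact hveq h
      rw [amodel_cons 0 v u r hcond]
      rw [ihr hr _ (validQ_mulQ _ _ hv (validQ_unit u hu))]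
      constructor
      · rintro ⟨t, ht, h1, h2⟩
        exact ⟨t + 1, by simpa using ht, by simpa [foldQ_cons] using h1, by simpa using h2⟩
      · rintro ⟨t, ht, h1, h2⟩
        cases t with
        | zero =>
          exfalso
          exact hveq (by simpa [foldQ] using h1)
        | succ t' =>
          exact ⟨t', by simp at ht; omega, by simpa [foldQ_cons] using h1, by simpa using h2⟩

-- cumulative-product list lemmas
lemma length_scanQ (us : List Nat) : ∀ v, (scanQ v us).length = us.length := by
  induction us with
  | nil => intro v; rfl
  | cons u r ihr => intro v; simp [scanQ, ihr]

lemma scanQ_getElem (us : List Nat) : ∀ (v : Int × Nat) (t : Nat) (h : t < us.length),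
    (scanQ v us)[t]'(by rw [length_scanQ]; exact h) = foldQ v (us.take (t + 1)) := by
  induction us with
  | nil => intro v t h; simp at h
  | cons u r ihr =>
    intro v t h
    cases t with
    | zero => simp [scanQ, foldQ]
    | succ t' =>
      have h' : t' < r.length := by simpa using h
      have := ihr (mulQ v (1, u)) t' h'
      simpa [scanQ, foldQ_cons] using this

lemma scanQ_getLast? (us : List Nat) (h : us ≠ []) : ∀ v,
    (scanQ v us).getLast? = some (foldQ v us) := by
  induction us with
  | nil => exact absurd rfl h
  | cons u r ihr =>
    intro v
    cases r with
    | nil => simp [scanQ, foldQ, List.getLast?]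
    | cons x r' =>
      have := ihr (by simp) (mulQ v (1, u))
      rw [foldQ_cons]
      rw [show scanQ v (u :: x :: r') = mulQ v (1, u) :: scanQ (mulQ v (1, u)) (x :: r') from rfl]
      rw [← this]
      exact List.getLast?_cons_cons ..

lemma mem_drop_iff {α : Type} (x : α) (l : List α) (m : Nat) :
    x ∈ l.drop m ↔ ∃ q, m ≤ q ∧ ∃ h : q < l.length, l[q] = x := by
  constructor
  · intro hx
    obtain ⟨k, hk, he⟩ := List.mem_iff_getElem.mp hx
    have hk' : m + k < l.length := by
      have := List.length_drop (l := l) (i := m); omega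
    refine ⟨m + k, by omega, hk', ?_⟩
    rw [← List.getElem_drop]
    exact he
  · rintro ⟨q, hq, hlt, he⟩
    rw [List.mem_iff_getElem]
    have hql : q - m < (l.drop m).length := by
      have := List.length_drop (l := l) (i := m); omega
    refine ⟨q - m, hql, ?_⟩
    rw [List.getElem_drop]
    have : m + (q - m) = q := by omega
    simp_rw [this]
    exact he

-- B-side: the port computes the cumulative-product list
lemma pyUNIT_get : ∀ c ∈ alphaL, pyUNIT.get? c = some (charU c) := by
  intro c hc; fin_cases hc <;> decide

lemma buildPrefix_eq (cs : List Char) (digits : Int) (hd : digits ≤ (cs.length : Int))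
    (hall : ∀ c ∈ cs.take digits.toNat, c ∈ alphaL) :
    ∀ (n : Nat) (jn : Nat) (v : Int × Nat), (digits - jn).toNat = n →
      buildPrefix cs (PySem.List.pyRange jn digits 1) v.1 v.2
        = some (scanQ v (((cs.take digits.toNat).drop jn).map charU)) := by
  intro n
  induction n with
  | zero =>
    intro jn v hn
    have hle : digits ≤ (jn : Int) := by omega
    rw [PySem.List.pyRange_one_eq_nil hle]
    have hdrop : (cs.take digits.toNat).drop jn = [] := by
      apply List.drop_eq_nil_of_le
      have : (cs.take digits.toNat).length ≤ digits.toNat := by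
        rw [List.length_take]; omega
      omega
    rw [hdrop]
    rfl
  | succ n ihn =>
    intro jn v hn
    have hj : (jn : Int) < digits := by omega
    have hjd : jn < digits.toNat := by omega
    have hlen2 : digits.toNat ≤ cs.length := by omega
    have hjlt : jn < cs.length := by omega
    rw [PySem.List.pyRange_one_cons hj]
    have hget : PySem.List.pyGet? cs (jn : Int) = some cs[jn] := by
      simp [List.getElem?_eq_getElem hjlt]
    have hcmem : cs[jn] ∈ alphaL := by
      apply hall
      have hjt : jn < (cs.take digits.toNat).length := by
        rw [List.length_take]; omega
      have hg : (cs.take digits.toNat)[jn] = cs[jn] := List.getElem_take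
      rw [← hg]
      exact List.getElem_mem hjt
    have hus : (cs.take digits.toNat).drop jn
        = cs[jn] :: (cs.take digits.toNat).drop (jn + 1) := by
      have hjt : jn < (cs.take digits.toNat).length := by
        rw [List.length_take]; omega
      rw [List.drop_eq_getElem_cons hjt]
      congr 1
      exact List.getElem_take
    rw [hus, List.map_cons]
    have hcast : ((jn : Int) + 1) = ((jn + 1 : Nat) : Int) := by push_cast; ring
    have hrec := ihn (jn + 1) (mulQ v (1, charU cs[jn])) (by omega)
    have hX : (pyTAB.getD v.2 []).getD (charU cs[jn]) ((1 : Int), (0 : Nat))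
        = (sgT v.2 (charU cs[jn]), axT v.2 (charU cs[jn])) := rfl
    have hm : mulQ v (1, charU cs[jn])
        = (v.1 * sgT v.2 (charU cs[jn]), axT v.2 (charU cs[jn])) := by
      simp [mulQ]
    rw [hm] at hrec
    simp only [buildPrefix, hget, pyUNIT_get cs[jn] hcmem, hcast, hX, hrec]
    rw [show scanQ v (charU cs[jn] :: ((cs.take digits.toNat).drop (jn + 1)).map charU)
        = mulQ v (1, charU cs[jn]) :: scanQ (mulQ v (1, charU cs[jn]))
            (((cs.take digits.toNat).drop (jn + 1)).map charU) from rfl, hm]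

-- what B decides about the cumulative-product list
def BCond (P : List (Int × Nat)) : Prop :=
  P.getLast? = some ((-1 : Int), (0 : Nat)) ∧
    ∃ p, PySem.List.index? P ((1 : Int), (1 : Nat)) = some p ∧
      ∃ q, p < q ∧ ∃ h : q < P.length, P[q] = ((1 : Int), (3 : Nat))

lemma alt_eq (s : String) (digits : Int) (hd : digits ≤ (s.toList.length : Int))
    (hall : ∀ c ∈ s.toList.take digits.toNat, c ∈ alphaL) :
    (get_ijk_alt s digits = true ↔
      BCond (scanQ (1, 0) ((s.toList.take digits.toNat).map charU))) := by
  unfold get_ijk_alt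
  have hb := buildPrefix_eq s.toList digits hd hall (digits - ((0 : Nat) : Int)).toNat 0 (1, 0) rfl
  simp only [Nat.cast_zero, List.drop_zero] at hb
  simp only [hb]
  set P := scanQ ((1 : Int), (0 : Nat)) ((s.toList.take digits.toNat).map charU) with hP
  rw [PySem.List.pyGet?_neg_one]
  by_cases h1 : P = [] ∨ ¬ P.getLast? = some ((-1 : Int), (0 : Nat))
  · rw [if_pos h1]
    simp only [Bool.false_eq_true, false_iff]
    rintro ⟨hlast, -⟩
    rcases h1 with h1 | h1
    · rw [h1] at hlast; simp at hlast
    · exact h1 hlast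
  · rw [if_neg h1]
    rw [not_or, not_not] at h1
    obtain ⟨hne, hlast⟩ := h1
    by_cases h2 : ((1 : Int), (1 : Nat)) ∈ P
    · rw [if_neg (by simpa using h2)]
      obtain ⟨p, hp⟩ := Option.isSome_iff_exists.mp ((PySem.List.index?_isSome_iff _ _).mpr h2)
      simp only [hp]
      rw [show ((p : Int) + 1) = ((p + 1 : Nat) : Int) by push_cast; ring,
        PySem.List.slice_from_natCast]
      rw [decide_eq_true_eq, mem_drop_iff]
      constructor
      · rintro ⟨q, hq, hlt, he⟩
        exact ⟨hlast, p, hp, q, by omega, hlt, he⟩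
      · rintro ⟨-, p', hp', q, hpq, hlt, he⟩
        rw [hp] at hp'
        have hpp : p' = p := by injection hp' with h; omega
        subst hpp
        exact ⟨q, by omega, hlt, he⟩
    · rw [if_pos (by simpa using h2)]
      simp only [Bool.false_eq_true, false_iff]
      rintro ⟨-, p, hp, -⟩
      exact h2 ((PySem.List.index?_isSome_iff _ _).mp (by rw [hp]; rfl))

-- the heart: greedy block search succeeds exactly when the cumulative list witnesses i then k
-- with total product -1
lemma core (us : List Nat) (hus : ∀ u ∈ us, u < 4) :
    (∃ t ≤ us.length, foldQ (1, 0) (us.take t) = targetQ 0 ∧ P1cond (us.drop t)) ↔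
      BCond (scanQ (1, 0) us) := by
  have hPl : (scanQ ((1 : Int), (0 : Nat)) us).length = us.length := length_scanQ us _
  have hvtake : ∀ a, ∀ x ∈ us.take a, x < 4 := fun a x hx => hus x (List.mem_of_mem_take hx)
  have hvdrop : ∀ a, ∀ x ∈ us.drop a, x < 4 := fun a x hx => hus x (List.mem_of_mem_drop hx)
  have hvdt : ∀ a b, ∀ x ∈ (us.drop a).take b, x < 4 :=
    fun a b x hx => hus x (List.mem_of_mem_drop (List.mem_of_mem_take hx))
  have hvdd : ∀ a b, ∀ x ∈ (us.drop a).drop b, x < 4 :=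
    fun a b x hx => hus x (List.mem_of_mem_drop (List.mem_of_mem_drop hx))
  have hone : validQ ((1 : Int), (0 : Nat)) := ⟨Or.inl rfl, by norm_num⟩
  have cm1 : mulQ ((1 : Int), (1 : Nat)) (targetQ 1) = ((1 : Int), (3 : Nat)) := by decide
  have cm2 : mulQ ((1 : Int), (3 : Nat)) (targetQ 2) = ((-1 : Int), (0 : Nat)) := by decide
  constructor
  · rintro ⟨t, ht, h1, t', ht', h2, h3⟩
    have ht1 : 1 ≤ t := by
      rcases Nat.eq_zero_or_pos t with rfl | h
      · rw [List.take_zero] at h1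
        exact absurd h1 (by decide)
      · exact h
    have ht'1 : 1 ≤ t' := by
      rcases Nat.eq_zero_or_pos t' with rfl | h
      · rw [List.take_zero] at h2
        exact absurd h2 (by decide)
      · exact h
    have ht'L : t' ≤ us.length - t := by
      have := List.length_drop (l := us) (i := t); omega
    have husne : us ≠ [] := by
      intro h; rw [h] at ht; simp at ht; omega
    have e1 : foldQ (1, 0) (us.take t) = ((1 : Int), (1 : Nat)) := h1
    have etake : us.take (t + t') = us.take t ++ (us.drop t).take t' := List.take_add ..
    have e2 : foldQ (1, 0) (us.take (t + t')) = ((1 : Int), (3 : Nat)) := by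
      rw [etake, foldQ_append, e1,
        foldQ_hom _ _ (by decide) (hvdt t t'), show prodQ ((us.drop t).take t') = targetQ 1 from h2,
        cm1]
    have elast : foldQ (1, 0) us = ((-1 : Int), (0 : Nat)) := by
      conv_lhs => rw [← List.take_append_drop (t + t') us]
      rw [foldQ_append, e2, foldQ_hom _ _ (by decide) (hvdrop (t + t'))]
      have hdd : us.drop (t + t') = (us.drop t).drop t' := by
        rw [List.drop_drop]
      rw [show prodQ (us.drop (t + t')) = targetQ 2 by rw [prodQ, hdd]; exact h3, cm2]
    have hlastP : (scanQ ((1 : Int), (0 : Nat)) us).getLast? = some ((-1 : Int), (0 : Nat)) := by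
      rw [scanQ_getLast? us husne, elast]
    have e1' : (scanQ ((1 : Int), (0 : Nat)) us)[t - 1]'(by omega) = ((1 : Int), (1 : Nat)) := by
      rw [scanQ_getElem us _ (t - 1) (by omega), show t - 1 + 1 = t by omega]
      exact e1
    have e2' : (scanQ ((1 : Int), (0 : Nat)) us)[t + t' - 1]'(by omega) = ((1 : Int), (3 : Nat)) := by
      rw [scanQ_getElem us _ (t + t' - 1) (by omega), show t + t' - 1 + 1 = t + t' by omega]
      exact e2
    have hmem : ((1 : Int), (1 : Nat)) ∈ scanQ ((1 : Int), (0 : Nat)) us :=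
      List.mem_iff_getElem.mpr ⟨t - 1, by omega, e1'⟩
    obtain ⟨p, hp⟩ := Option.isSome_iff_exists.mp ((PySem.List.index?_isSome_iff _ _).mpr hmem)
    obtain ⟨hpl, hpe, hmin⟩ := PySem.List.getElem_of_index?_eq_some hp
    have hple : p ≤ t - 1 := by
      by_contra h
      exact hmin (t - 1) (by omega) e1'
    have hpq : p < t + t' - 1 := by
      rcases Nat.lt_or_ge p (t + t' - 1) with h | h
      · exact h
      · exfalso
        have hpt : p = t + t' - 1 := by omega
        subst hpt
        have : ((1 : Int), (1 : Nat)) = ((1 : Int), (3 : Nat)) := hpe.symm.trans e2'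
        exact absurd this (by decide)
    exact ⟨hlastP, p, hp, t + t' - 1, hpq, by omega, e2'⟩
  · rintro ⟨hlast, p, hp, q, hpq, hql, he⟩
    have husne : us ≠ [] := by
      rintro rfl
      simp [scanQ] at hlast
    have hPi : foldQ (1, 0) us = ((-1 : Int), (0 : Nat)) := by
      have := scanQ_getLast? us husne ((1 : Int), (0 : Nat))
      rw [this] at hlast
      simpa using hlast
    obtain ⟨hpl, hpe, -⟩ := PySem.List.getElem_of_index?_eq_some hp
    have h1 : foldQ (1, 0) (us.take (p + 1)) = targetQ 0 := by
      have := scanQ_getElem us ((1 : Int), (0 : Nat)) p (by omega)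
      rw [this] at hpe
      exact hpe
    have hq1 : foldQ (1, 0) (us.take (q + 1)) = ((1 : Int), (3 : Nat)) := by
      have := scanQ_getElem us ((1 : Int), (0 : Nat)) q (by omega)
      rw [this] at he
      exact he
    have hmid : us.take (q + 1) = us.take (p + 1) ++ (us.drop (p + 1)).take (q - p) := by
      rw [← List.take_add]
      congr 1
      omega
    have hmidv : validQ (prodQ ((us.drop (p + 1)).take (q - p))) :=
      validQ_foldQ _ _ hone (hvdt (p + 1) (q - p))
    have h2 : foldQ (1, 0) ((us.drop (p + 1)).take (q - p)) = targetQ 1 := by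
      rw [hmid, foldQ_append, h1] at hq1
      rw [foldQ_hom _ _ (by decide) (hvdt (p + 1) (q - p))] at hq1
      have := congrArg (mulQ (invQ (targetQ 0))) hq1
      rw [mulQ_cancel_left _ _ ⟨Or.inl rfl, by decide⟩ hmidv.2] at this
      rw [show foldQ ((1 : Int), (0 : Nat)) ((us.drop (p + 1)).take (q - p))
          = prodQ ((us.drop (p + 1)).take (q - p)) from rfl, this]
      decide
    have hdropv : validQ (prodQ (us.drop (q + 1))) :=
      validQ_foldQ _ _ hone (hvdrop (q + 1))
    have h3 : foldQ (1, 0) ((us.drop (p + 1)).drop (q - p)) = targetQ 2 := by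
      have hdd : (us.drop (p + 1)).drop (q - p) = us.drop (q + 1) := by
        rw [List.drop_drop]; congr 1; omega
      rw [hdd]
      have hsplit : foldQ (1, 0) us = mulQ ((1 : Int), (3 : Nat)) (prodQ (us.drop (q + 1))) := by
        conv_lhs => rw [← List.take_append_drop (q + 1) us]
        rw [foldQ_append, hq1, foldQ_hom _ _ (by decide) (hvdrop (q + 1))]
      rw [hPi] at hsplit
      have := congrArg (mulQ (invQ ((1 : Int), (3 : Nat)))) hsplit.symm
      rw [mulQ_cancel_left _ _ ⟨Or.inl rfl, by decide⟩ hdropv.2] at this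
      rw [show foldQ ((1 : Int), (0 : Nat)) (us.drop (q + 1)) = prodQ (us.drop (q + 1)) from rfl,
        this]
      decide
    refine ⟨p + 1, by omega, h1, q - p, ?_, h2, h3⟩
    have := List.length_drop (l := us) (i := p + 1)
    omega

-- ===== VERDICT (by name: the statement is the Claim_ definition above) =====
theorem get_ijk_spec : Claim_equal_get_ijk := by
  unfold Claim_equal_get_ijk
  intro s d hdom hpre
  unfold Spec_get_ijk
  obtain ⟨hd0, hall0⟩ := hpre
  have hd : d ≤ (s.toList.length : Int) := by simpa using hd0
  have hall : ∀ c ∈ s.toList.take d.toNat, c ∈ alphaL := by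
    rw [List.all_eq_true] at hall0
    intro c hc
    simpa [alphaL] using hall0 c hc
  have hus : ∀ u ∈ (s.toList.take d.toNat).map charU, u < 4 := by
    rintro u hu
    obtain ⟨c, -, rfl⟩ := List.mem_map.mp hu
    exact charU_lt c
  have hA : get_ijk s d = amodel 0 (1, 0) ((s.toList.take d.toNat).map charU) := by
    unfold get_ijk
    have := loopA_eq s.toList d hd hall ((d - ((0 : Nat) : Int)).toNat * 3 + (2 - 0)) 0 0 []
      rfl (by omega) (by simp [SL])
    simpa [decodeQ] using this
  rw [Bool.eq_iff_iff, hA,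
    phase0_eq ((s.toList.take d.toNat).map charU) hus (1, 0) ⟨Or.inl rfl, by norm_num⟩,
    alt_eq s d hd hall]
  exact core ((s.toList.take d.toNat).map charU) hus
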